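-- pv_equiv track=rewrite | github.com/MrDuck128/AoC | 2024/09.py | part1
-- ===== SOURCE A (Python) =====
-- def part1(disk):
--     blanks = [i for i, val in enumerate(disk) if val == -1]
--
--     for i in blanks:
--         while i < len(disk):
--             val = disk.pop()
--             if val == -1: continue
--
--             disk[i] = val
--             break
--
--     return sum(i * val for i, val in enumerate(disk))
-- ===== SOURCE B (Python) =====
-- def part1(disk):
--     m = sum(1 for v in disk if v != -1)
--     fillers = iter([v for v in reversed(disk[m:]) if v != -1])
--     out = []
--     for v in disk[:m]:
--         if v == -1:
--             out.append(next(fillers))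
--         else:
--             out.append(v)
--     return sum(i * v for i, v in enumerate(out))
-- ===== Notes on version B (the rewrite author's own statement) =====
-- stated objective: alternative
-- what changed: Replaces the blanks-index-table plus destructive pop/write loop with a pure closed-form construction: count m of non-blank values, take disk[:m], and splice in the non-blank values of disk[m:] in reverse order; no mutation of disk and no convergence loop.
import Mathlib
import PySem

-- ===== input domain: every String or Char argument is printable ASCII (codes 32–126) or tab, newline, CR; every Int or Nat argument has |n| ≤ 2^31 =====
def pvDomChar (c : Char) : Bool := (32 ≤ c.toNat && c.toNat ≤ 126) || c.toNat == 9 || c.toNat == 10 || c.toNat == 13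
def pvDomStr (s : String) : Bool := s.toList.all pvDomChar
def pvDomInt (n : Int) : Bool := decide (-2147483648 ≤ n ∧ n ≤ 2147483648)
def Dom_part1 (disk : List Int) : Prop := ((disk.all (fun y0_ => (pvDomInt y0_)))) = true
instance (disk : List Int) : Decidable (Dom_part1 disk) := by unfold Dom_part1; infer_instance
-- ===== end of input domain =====

-- B replaces A's blanks-index-table plus destructive pop/write loop with a pure closed-form splice
-- (count the non-blanks, take that prefix, fill its blanks from the reversed tail); equivalence is about
-- the RETURN value only (A mutates its argument in place, B does not).

-- ===== PORT A =====
-- shared final line of both Pythons: sum(i * val for i, val in enumerate(lst))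
def pyChecksum (l : List Int) : Int :=
  (PySem.List.enumerate l 0).foldl (fun s p => s + p.1 * p.2) 0

-- A's inner while-loop: pop from the end; skip -1s; write the first non-blank at index i (then break),
-- or stop when the list has shrunk to length ≤ i.
def pvInnerA (i : Int) (d : List Int) : List Int :=
  if i < (d.length : Int) then
    match h : d.getLast? with
    | none => d          -- unreachable for the 0 ≤ i < len indices A uses (pop of [] would raise)
    | some v =>
      if v = -1 then pvInnerA i d.dropLast
      else PySem.List.pySetD d.dropLast i v
  else d
termination_by d.length
decreasing_by
  have hne : d ≠ [] := by intro he; subst he; simp at h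
  have := List.length_pos_iff.mpr hne
  simp [List.length_dropLast]; omega

-- blanks = [i for i, val in enumerate(disk) if val == -1]
def pvBlanksA (d : List Int) : List Int :=
  ((PySem.List.enumerate d 0).filter (fun p => p.2 == -1)).map Prod.fst

def part1 (disk : List Int) : Int :=
  let blanks := pvBlanksA disk
  pyChecksum (blanks.foldl (fun d i => pvInnerA i d) disk)

-- ===== PORT B =====
-- the for-loop of Source B: copy values, replacing each -1 by the next filler
def pvFill : List Int → List Int → List Int
  | [], _ => []
  | v :: t, fs =>
    if v = -1 then
      match fs with
      | f :: fs' => f :: pvFill t fs'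
      | [] => []       -- unreachable: disk[:m] has exactly as many -1s as there are fillers
    else v :: pvFill t fs

-- m, fillers, out of Source B (disk[:m] / disk[m:] with 0 ≤ m ≤ len(disk) are exactly take/drop)
def pvOutB (disk : List Int) : List Int :=
  let m := (disk.filter (fun v => v != -1)).length
  let fillers := ((disk.drop m).reverse).filter (fun v => v != -1)
  pvFill (disk.take m) fillers

def part1_alt (disk : List Int) : Int := pyChecksum (pvOutB disk)

-- ===== PRECONDITION & SPEC =====
def Spec_part1 (disk : List Int) (out : Int) : Prop := out = part1_alt disk
instance (disk : List Int) (out : Int) : Decidable (Spec_part1 disk out) := by unfold Spec_part1; infer_instance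

-- ===== CLAIM (what is proved, stated in full; the proofs are below) =====
def Claim_equal_part1 : Prop := ∀ (disk : List Int), Dom_part1 disk → Spec_part1 disk (part1 disk)

-- ===== LEMMAS AND PROOFS =====

-- proof-side Nat-indexed version of A's blanks list
def pvBlanksN : List Int → List Nat
  | [] => []
  | x :: t => if x = -1 then 0 :: (pvBlanksN t).map (· + 1) else (pvBlanksN t).map (· + 1)

theorem pvBlanksA_eq (d : List Int) (s : Int) :
    ((PySem.List.enumerate d s).filter (fun p => p.2 == -1)).map Prod.fst
      = (pvBlanksN d).map (fun (k : Nat) => s + (k : Int)) := by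
  induction d generalizing s with
  | nil => simp [PySem.List.enumerate_nil, pvBlanksN]
  | cons x t ih =>
    rw [PySem.List.enumerate_cons, List.filter_cons]
    by_cases hx : x = -1
    · rw [if_pos (by simpa using hx), List.map_cons, ih]
      rw [show pvBlanksN (x :: t) = 0 :: (pvBlanksN t).map (· + 1) from by
        simp [pvBlanksN, hx]]
      rw [List.map_cons, List.map_map]
      refine congrArg₂ List.cons (by simp) ?_
      apply List.map_congr_left
      intro k _
      show s + 1 + (k : Int) = s + ((k + 1 : Nat) : Int)
      push_cast; ring
    · rw [if_neg (by simpa using hx), ih]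
      rw [show pvBlanksN (x :: t) = (pvBlanksN t).map (· + 1) from by
        simp [pvBlanksN, hx]]
      rw [List.map_map]
      apply List.map_congr_left
      intro k _
      show s + 1 + (k : Int) = s + ((k + 1 : Nat) : Int)
      push_cast; ring

theorem pvBlanksN_mem {d : List Int} {k : Nat} : k ∈ pvBlanksN d ↔ d[k]? = some (-1) := by
  induction d generalizing k with
  | nil => simp [pvBlanksN]
  | cons x t ih =>
    cases k with
    | zero => by_cases hx : x = -1 <;> simp [pvBlanksN, hx]
    | succ n => by_cases hx : x = -1 <;> simp [pvBlanksN, hx, ih]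

theorem pvBlanksN_lt {d : List Int} {k : Nat} (h : k ∈ pvBlanksN d) : k < d.length := by
  have h2 := pvBlanksN_mem.mp h
  exact (List.getElem?_eq_some_iff.mp h2).1

theorem pvBlanksN_pairwise (d : List Int) : (pvBlanksN d).Pairwise (· < ·) := by
  induction d with
  | nil => simp [pvBlanksN]
  | cons x t ih =>
    have hm : ((pvBlanksN t).map (· + 1)).Pairwise (· < ·) :=
      (List.pairwise_map).mpr (ih.imp (by omega))
    by_cases hx : x = -1
    · simp only [pvBlanksN, if_pos hx]
      refine List.pairwise_cons.mpr ⟨?_, hm⟩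
      intro j hj; obtain ⟨i, _, rfl⟩ := List.mem_map.mp hj; omega
    · simpa [pvBlanksN, hx] using hm

theorem pvBlanksN_append (a b : List Int) :
    pvBlanksN (a ++ b) = pvBlanksN a ++ (pvBlanksN b).map (· + a.length) := by
  induction a with
  | nil => simp [pvBlanksN]
  | cons x t ih =>
    by_cases hx : x = -1
    · simp only [List.cons_append, pvBlanksN, if_pos hx, ih, List.map_append, List.map_map,
        List.length_cons, List.cons_append]
      refine congrArg₂ List.cons rfl (congrArg₂ List.append rfl ?_)
      apply List.map_congr_left; intro k _; simp [Function.comp]; omega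
    · simp only [List.cons_append, pvBlanksN, if_neg hx, ih, List.map_append, List.map_map,
        List.length_cons]
      refine congrArg₂ List.append rfl ?_
      apply List.map_congr_left; intro k _; simp [Function.comp]; omega

theorem pvBlanksN_nil_of_noblank {l : List Int} (h : ∀ x ∈ l, x ≠ -1) : pvBlanksN l = [] := by
  induction l with
  | nil => rfl
  | cons x t ih =>
    have hx := h x (by simp)
    simp [pvBlanksN, hx, ih (fun y hy => h y (by simp [hy]))]

theorem pvNoblank_of_blanksN_nil {l : List Int} (h : pvBlanksN l = []) : ∀ x ∈ l, x ≠ -1 := by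
  intro x hx he
  obtain ⟨k, hk, rfl⟩ := List.mem_iff_getElem.mp hx
  have : k ∈ pvBlanksN l := pvBlanksN_mem.mpr (by simp [List.getElem?_eq_getElem hk, he])
  simp [h] at this

theorem pvInnerA_noop (b : Nat) (d : List Int) (h : ¬ b < d.length) :
    pvInnerA (b : Int) d = d := by
  rw [pvInnerA]
  rw [if_neg (by exact_mod_cast h)]

theorem pvInnerA_skip {R : List Int} (hR : ∀ x ∈ R, x = -1) :
    ∀ (M : List Int) (b : Nat), b < M.length → pvInnerA (b : Int) (M ++ R) = pvInnerA (b : Int) M := by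
  induction R using List.reverseRecOn with
  | nil => intro M b _; simp
  | append_singleton R' y ihR =>
    intro M b hb
    have hy : y = -1 := hR y (by simp)
    rw [show M ++ (R' ++ [y]) = (M ++ R') ++ [y] from by simp]
    rw [pvInnerA]
    rw [if_pos (by push_cast; simp; omega)]
    split
    · rename_i heq; simp at heq
    · rename_i v heq
      have hv : v = y := (by simpa using heq : y = v).symm
      rw [if_pos (hv.trans hy)]
      rw [List.dropLast_concat]
      exact ihR (fun x hx => hR x (by simp [hx])) M b hb

theorem pvInnerA_fill {v : Int} (hv : v ≠ -1) (M : List Int) (b : Nat) (hb : b < M.length) :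
    pvInnerA (b : Int) (M ++ [v]) = M.set b v := by
  rw [pvInnerA]
  rw [if_pos (by push_cast; simp; omega)]
  split
  · rename_i heq; simp at heq
  · rename_i w heq
    have hw : w = v := (by simpa using heq : v = w).symm
    rw [if_neg (hw ▸ hv)]
    rw [List.dropLast_concat, hw]
    simp [PySem.List.pySetD_natCast]

theorem pvInnerA_drain {S : List Int} (hne : S ≠ []) (hS : ∀ x ∈ S, x = -1) :
    ∀ (P : List Int), pvInnerA (P.length : Int) (P ++ S) = P := by
  induction S using List.reverseRecOn with
  | nil => exact absurd rfl hne
  | append_singleton S' y ihS =>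
    intro P
    have hy : y = -1 := hS y (by simp)
    rw [show P ++ (S' ++ [y]) = (P ++ S') ++ [y] from by simp]
    rw [pvInnerA]
    rw [if_pos (by push_cast; simp)]
    split
    · rename_i heq; simp at heq
    · rename_i v heq
      have hv : v = y := (by simpa using heq : y = v).symm
      rw [if_pos (hv.trans hy)]
      rw [List.dropLast_concat]
      rcases eq_or_ne S' [] with rfl | hne'
      · simp only [List.append_nil]
        exact pvInnerA_noop P.length P (by omega)
      · exact ihS hne' (fun x hx => hS x (by simp [hx])) P

theorem pvSet_append (P : List Int) (x v : Int) (Q : List Int) :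
    (P ++ x :: Q).set P.length v = P ++ v :: Q := by
  induction P with
  | nil => simp
  | cons p t ih => simp [List.set, ih]

theorem pvFill_noblank_prefix {P : List Int} (hP : ∀ x ∈ P, x ≠ -1) (l fs : List Int) :
    pvFill (P ++ l) fs = P ++ pvFill l fs := by
  induction P with
  | nil => simp
  | cons p t ih =>
    have hp : p ≠ -1 := hP p (by simp)
    simp only [List.cons_append, pvFill, if_neg hp]
    rw [ih (fun x hx => hP x (by simp [hx]))]

theorem pvFill_noblank {P : List Int} (hP : ∀ x ∈ P, x ≠ -1) (fs : List Int) :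
    pvFill P fs = P := by
  have := pvFill_noblank_prefix hP [] fs
  simpa [pvFill] using this

theorem pvOutB_noblank {P : List Int} (hP : ∀ x ∈ P, x ≠ -1) : pvOutB P = P := by
  have hf : P.filter (fun v => v != -1) = P :=
    List.filter_eq_self.mpr (fun a ha => by simpa using hP a ha)
  simp only [pvOutB, hf]
  rw [List.take_of_length_le (le_refl _), List.drop_of_length_le (le_refl _)]
  simpa using pvFill_noblank hP _

theorem pvLastNonblank {M : List Int} (h : ∃ x ∈ M, x ≠ -1) :
    ∃ Q v R, M = Q ++ v :: R ∧ v ≠ -1 ∧ (∀ x ∈ R, x = -1) := by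
  induction M using List.reverseRecOn with
  | nil => simp at h
  | append_singleton M' y ih =>
    by_cases hy : y = -1
    · subst hy
      obtain ⟨x, hx, hxne⟩ := h
      have hx' : x ∈ M' := by
        rcases List.mem_append.mp hx with h' | h'
        · exact h'
        · simp at h'; exact absurd h' hxne
      obtain ⟨Q, v, R, rfl, hv, hR⟩ := ih ⟨x, hx', hxne⟩
      exact ⟨Q, v, R ++ [-1], by simp, hv, fun x hx => by
        rcases List.mem_append.mp hx with h' | h'
        · exact hR x h'
        · simpa using h'⟩
    · exact ⟨M', y, [], by simp, hy, by simp⟩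

theorem pvOutB_step {P Q R : List Int} {v : Int} (hP : ∀ x ∈ P, x ≠ -1) (hv : v ≠ -1)
    (hR : ∀ x ∈ R, x = -1) :
    pvOutB (P ++ -1 :: (Q ++ v :: R)) = pvOutB (P ++ v :: Q) := by
  have hPf : P.filter (fun v => v != -1) = P :=
    List.filter_eq_self.mpr (fun a ha => by simpa using hP a ha)
  have hRf : R.filter (fun v => v != -1) = [] := by
    rw [List.filter_eq_nil_iff]; intro a ha; simpa using hR a ha
  have hRrf : R.reverse.filter (fun v => v != -1) = [] := by
    rw [List.filter_eq_nil_iff]; intro a ha; simp at ha; simpa using hR a ha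
  set nQ := (Q.filter (fun v => v != -1)).length with hnQ
  have hnQle : nQ ≤ Q.length := by simpa [hnQ] using List.length_filter_le _ Q
  have hmL : ((P ++ -1 :: (Q ++ v :: R)).filter (fun w => w != -1)).length = P.length + (1 + nQ) := by
    simp [List.filter_append, hPf, hv, hRf, hnQ]; omega
  have hmRlen : ((P ++ v :: Q).filter (fun w => w != -1)).length = P.length + (1 + nQ) := by
    simp [List.filter_append, hPf, hv, hnQ]; omega
  have htakeL : (P ++ -1 :: (Q ++ v :: R)).take (P.length + (1 + nQ)) = P ++ -1 :: Q.take nQ := by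
    rw [List.take_append, Nat.add_comm 1 nQ,
      List.take_of_length_le (by omega : P.length ≤ P.length + (nQ+1))]
    simp [List.take_succ_cons, List.take_append_of_le_length hnQle]
  have hdropL : (P ++ -1 :: (Q ++ v :: R)).drop (P.length + (1 + nQ)) = Q.drop nQ ++ v :: R := by
    rw [List.drop_append, Nat.add_comm 1 nQ,
      List.drop_of_length_le (by omega : P.length ≤ P.length + (nQ+1))]
    simp [List.drop_append_of_le_length hnQle]
  have htakeR : (P ++ v :: Q).take (P.length + (1 + nQ)) = P ++ v :: Q.take nQ := by
    rw [List.take_append, Nat.add_comm 1 nQ,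
      List.take_of_length_le (by omega : P.length ≤ P.length + (nQ+1))]
    simp
  have hdropR : (P ++ v :: Q).drop (P.length + (1 + nQ)) = Q.drop nQ := by
    rw [List.drop_append, Nat.add_comm 1 nQ,
      List.drop_of_length_le (by omega : P.length ≤ P.length + (nQ+1))]
    simp
  have hfillerL : (((Q.drop nQ ++ v :: R).reverse).filter (fun w => w != -1))
      = v :: ((Q.drop nQ).reverse.filter (fun w => w != -1)) := by
    simp [List.reverse_append, List.filter_append, hRrf, hv]
  simp only [pvOutB, hmL, hmRlen, htakeL, hdropL, htakeR, hdropR, hfillerL]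
  rw [pvFill_noblank_prefix hP, pvFill_noblank_prefix hP]
  simp only [pvFill, if_neg hv]
  simp

-- main loop invariant: folding A's inner loop over any pending index list whose in-range part is
-- exactly the blank positions of d produces B's output
theorem pvFold (bs : List Nat) :
    ∀ d : List Int, pvBlanksN d = bs.filter (fun b => b < d.length) →
      bs.foldl (fun d (k : Nat) => pvInnerA (k : Int) d) d = pvOutB d := by
  induction bs with
  | nil =>
    intro d h
    simp only [List.filter_nil] at h
    rw [List.foldl_nil]
    exact (pvOutB_noblank (pvNoblank_of_blanksN_nil h)).symm
  | cons b rest ih =>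
    intro d h
    rw [List.foldl_cons]
    by_cases hb : b < d.length
    · have hfc : pvBlanksN d = b :: rest.filter (fun e => e < d.length) := by
        rw [h, List.filter_cons, if_pos (by simpa using hb)]
      have hbmem : b ∈ pvBlanksN d := by rw [hfc]; simp
      have hdb : d[b]? = some (-1) := pvBlanksN_mem.mp hbmem
      have hdb' : d[b]'hb = -1 := by
        rw [List.getElem?_eq_getElem hb] at hdb; simpa using hdb
      have hpw : ∀ e ∈ rest.filter (fun e => e < d.length), b < e := by
        have := pvBlanksN_pairwise d
        rw [hfc] at this
        exact (List.pairwise_cons.mp this).1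
      have hrestlt : ∀ e ∈ rest, e < d.length → b < e := by
        intro e he hlt
        exact hpw e (List.mem_filter.mpr ⟨he, by simpa using hlt⟩)
      set P := d.take b with hPdef
      set M := d.drop (b+1) with hMdef
      have hPlen : P.length = b := by simp [hPdef]; omega
      have hdec : d = P ++ -1 :: M := by
        conv_lhs => rw [← List.take_append_drop b d]
        rw [hPdef, hMdef]
        congr 1
        rw [List.drop_eq_getElem_cons hb, hdb']
      have hPnb : ∀ x ∈ P, x ≠ -1 := by
        intro x hx he
        obtain ⟨j, hj, hxe⟩ := List.mem_iff_getElem.mp hx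
        have hjb : j < b := by rw [hPlen] at hj; exact hj
        have hPj : P[j] = d[j]'(by omega) := by
          exact List.getElem_take
        have hdj : d[j]? = some (-1) := by
          rw [List.getElem?_eq_getElem (by omega : j < d.length)]
          rw [← hPj, hxe, he]
        have hjmem : j ∈ pvBlanksN d := pvBlanksN_mem.mpr hdj
        rw [hfc] at hjmem
        rcases List.mem_cons.mp hjmem with h' | h'
        · omega
        · exact absurd (hpw j h') (by omega)
      by_cases hMnb : ∃ x ∈ M, x ≠ -1
      · obtain ⟨Q, w, Rr, hMeq, hw, hRr⟩ := pvLastNonblank hMnb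
        have hstep : pvInnerA (b : Int) d = P ++ w :: Q := by
          rw [hdec, hMeq]
          rw [show P ++ -1 :: (Q ++ w :: Rr) = ((P ++ -1 :: Q) ++ [w]) ++ Rr from by simp]
          rw [pvInnerA_skip hRr _ b (by simp [hPlen])]
          rw [pvInnerA_fill hw _ b (by simp [hPlen])]
          rw [← hPlen, pvSet_append]
        have hout : pvOutB d = pvOutB (P ++ w :: Q) := by
          rw [hdec, hMeq]; exact pvOutB_step hPnb hw hRr
        rw [hstep, hout]
        apply ih
        -- compute both sides of the new invariant
        have hQlt := fun {k} (hk : k ∈ pvBlanksN Q) => pvBlanksN_lt hk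
        have hBd : pvBlanksN d
            = b :: ((pvBlanksN Q).map (fun k => k + (b+1))
                ++ (pvBlanksN Rr).map (fun k => k + (b + 1 + (Q.length + 1)))) := by
          rw [hdec, hMeq, pvBlanksN_append, pvBlanksN_nil_of_noblank hPnb]
          rw [show pvBlanksN (-1 :: (Q ++ w :: Rr))
              = 0 :: (pvBlanksN (Q ++ w :: Rr)).map (· + 1) from by simp [pvBlanksN]]
          rw [pvBlanksN_append]
          rw [show pvBlanksN (w :: Rr) = (pvBlanksN Rr).map (· + 1) from by simp [pvBlanksN, hw]]
          simp only [List.nil_append, List.map_cons, List.map_append, List.map_map, List.length_cons]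
          rw [hPlen]
          refine congrArg₂ List.cons (by omega) (congrArg₂ (· ++ ·) ?_ ?_) <;>
            · apply List.map_congr_left; intro k _; simp [Function.comp]; omega
        have htail : rest.filter (fun e => e < d.length)
            = (pvBlanksN Q).map (fun k => k + (b+1))
                ++ (pvBlanksN Rr).map (fun k => k + (b + 1 + (Q.length + 1))) := by
          have := hfc.symm.trans hBd
          exact (List.cons.injEq _ _ _ _ ▸ this).2
        have hlen' : (P ++ w :: Q).length = b + 1 + Q.length := by simp [hPlen]; omega
        have hlend : d.length = b + 1 + Q.length + 1 + Rr.length := by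
          rw [hdec, hMeq]; simp [hPlen]; omega
        have hstep2 : rest.filter (fun e => e < (P ++ w :: Q).length)
            = (pvBlanksN Q).map (fun k => k + (b+1)) := by
          have h1 : rest.filter (fun e => e < (P ++ w :: Q).length)
              = (rest.filter (fun e => e < d.length)).filter
                  (fun e => e < (P ++ w :: Q).length) := by
            rw [List.filter_filter]
            apply List.filter_congr
            intro a _
            by_cases ha : a < (P ++ w :: Q).length
            · have had : a < d.length := by rw [hlen'] at ha; omega
              simp [ha, had]
            · simp only [decide_eq_true_eq] at ha ⊢
              simp [ha]
              intro h'
              exact absurd (by omega : a < (P ++ w :: Q).length) ha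
          rw [h1, htail, List.filter_append, List.filter_map, List.filter_map]
          have h2 : (pvBlanksN Q).filter ((fun e => e < (P ++ w :: Q).length)
              ∘ (fun k => k + (b+1))) = pvBlanksN Q := by
            apply List.filter_eq_self.mpr
            intro a ha
            have := pvBlanksN_lt ha
            simp [Function.comp, hlen']; omega
          have h3 : (pvBlanksN Rr).filter ((fun e => e < (P ++ w :: Q).length)
              ∘ (fun k => k + (b + 1 + (Q.length + 1)))) = [] := by
            apply List.filter_eq_nil_iff.mpr
            intro a ha
            simp [Function.comp, hlen']
            omega
          rw [h2, h3]
          simp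
        rw [hstep2]
        rw [show P ++ w :: Q = P ++ (w :: Q) from rfl, pvBlanksN_append,
          pvBlanksN_nil_of_noblank hPnb]
        rw [show pvBlanksN (w :: Q) = (pvBlanksN Q).map (· + 1) from by simp [pvBlanksN, hw]]
        simp only [List.nil_append, List.map_map]
        apply List.map_congr_left; intro k _; simp [Function.comp, hPlen]; omega
      · push_neg at hMnb
        have hstep : pvInnerA (b : Int) d = P := by
          rw [hdec, ← hPlen]
          exact pvInnerA_drain (by simp) (by
            intro x hx
            rcases List.mem_cons.mp hx with h' | h'
            · exact h'
            · exact hMnb x h') P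
        have hout : pvOutB d = P := by
          have hPf : P.filter (fun w => w != -1) = P :=
            List.filter_eq_self.mpr (fun a ha => by simpa using hPnb a ha)
          have hMf : ((-1 : Int) :: M).filter (fun w => w != -1) = [] := by
            rw [List.filter_eq_nil_iff]
            intro a ha
            rcases List.mem_cons.mp ha with h' | h'
            · simp [h']
            · simp [hMnb a h']
          have hm : (d.filter (fun w => w != -1)).length = P.length := by
            rw [hdec, List.filter_append, hPf, hMf]; simp
          have htk : d.take P.length = P := by
            rw [hdec, ← Nat.add_zero P.length, List.take_append]; simp
          simp only [pvOutB, hm, htk]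
          exact pvFill_noblank hPnb _
        rw [hstep, hout]
        have hinv : pvBlanksN P = rest.filter (fun e => e < P.length) := by
          rw [pvBlanksN_nil_of_noblank hPnb]
          symm
          rw [List.filter_eq_nil_iff]
          intro e he
          simp only [decide_eq_true_eq]
          intro hlt
          have : b < e := hrestlt e he (by omega)
          omega
        rw [ih P hinv, pvOutB_noblank hPnb]
    · rw [pvInnerA_noop b d hb]
      apply ih d
      rw [h, List.filter_cons, if_neg (by simpa using hb)]

-- ===== VERDICT (by name: the statement is the Claim_ definition above) =====
theorem part1_spec : Claim_equal_part1 := by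
  intro disk _
  show part1 disk = part1_alt disk
  have h1 : pvBlanksA disk = (pvBlanksN disk).map (fun (k : Nat) => (k : Int)) := by
    have h0 := pvBlanksA_eq disk 0
    rw [show pvBlanksA disk
        = ((PySem.List.enumerate disk 0).filter (fun p => p.2 == -1)).map Prod.fst from rfl, h0]
    apply List.map_congr_left; intro k _; omega
  simp only [part1, part1_alt, h1, List.foldl_map]
  congr 1
  apply pvFold
  symm
  apply List.filter_eq_self.mpr
  intro a ha
  simpa using pvBlanksN_lt ha
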